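-- pv_equiv track=rewrite | github.com/to302/baekjoon | p9000/p9324.py | valid_index
-- ===== SOURCE A (Python) =====
-- def valid_index(ss, c):
--     beg = 0
--     idx = []
--     while True:
--         pos = ss.find(c, beg)
--         if pos == -1:
--             break
--         idx.append(pos)
--         beg = pos+1
--
--     for i in range(2, len(idx), 4):
--         if (idx[i+1] - idx[i]) != 1:
--             return False
--
--     return True
-- ===== SOURCE B (Python) =====
-- def valid_index(ss, c):
--     beg = 0
--     k = 0
--     prev = 0
--     while True:
--         pos = ss.find(c, beg)
--         if pos == -1:
--             return True
--         if k % 4 == 3 and pos - prev != 1: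
--             return False
--         prev = pos
--         k += 1
--         beg = pos + 1
-- ===== Notes on version B (the rewrite author's own statement) =====
-- stated objective: simpler
-- what changed: A collects all match positions into a list and then runs a second index pass over range(2,len,4) comparing idx[i+1]-idx[i]; B fuses the check into the single find loop with a running occurrence counter, comparing each position whose index is 3 mod 4 against its predecessor, so no list and no second pass exist. Pre_ excludes inputs whose occurrence count is 3 mod 4, where A either raises IndexError (idx[i+1] past the end) or returns False exactly as B does.
-- outside the precondition, e.g. on valid_index('aaa aaaa', 'a'): A returns False, B returns False
import Mathlib
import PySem

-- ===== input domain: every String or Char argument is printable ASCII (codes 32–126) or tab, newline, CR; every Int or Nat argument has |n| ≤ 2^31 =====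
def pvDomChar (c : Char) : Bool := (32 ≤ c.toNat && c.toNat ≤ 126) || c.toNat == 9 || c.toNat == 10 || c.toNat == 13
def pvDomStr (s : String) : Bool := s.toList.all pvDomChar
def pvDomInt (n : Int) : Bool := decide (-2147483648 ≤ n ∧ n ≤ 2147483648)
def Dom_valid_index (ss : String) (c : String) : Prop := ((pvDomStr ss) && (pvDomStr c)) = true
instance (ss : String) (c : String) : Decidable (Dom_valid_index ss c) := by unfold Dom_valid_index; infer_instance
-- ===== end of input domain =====

-- B fuses A's second range(2,len,4) pass into the single find loop (running counter, no position list);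
-- equivalence is about the return value only.

-- ===== PORT A =====
-- the `while True` collection loop: fuel bounds the iterations (each step moves beg past len eventually)
def findLoopA (s c : List Char) (beg : Int) : Nat → List Int
  | 0 => []
  | fuel + 1 =>
    let pos := PySem.Chars.findFrom s c beg none
    if pos = -1 then [] else pos :: findLoopA s c (pos + 1) fuel

-- the `for i in range(2, len(idx), 4)` pass; `none` from pyGet? is Python's IndexError (excluded by Pre_)
def forLoopA (idx : List Int) : List Int → Bool
  | [] => true
  | i :: is =>
    match PySem.List.pyGet? idx (i + 1), PySem.List.pyGet? idx i with
    | some a, some b => if (a - b) != 1 then false else forLoopA idx is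
    | _, _ => false

def valid_index (ss : String) (c : String) : Bool :=
  let idx := findLoopA ss.toList c.toList 0 (ss.toList.length + 2)
  forLoopA idx (PySem.List.pyRange 2 (idx.length : Int) 4)

-- ===== PORT B =====
def loopB (s c : List Char) (beg : Int) (k : Int) (prev : Int) : Nat → Bool
  | 0 => true
  | fuel + 1 =>
    let pos := PySem.Chars.findFrom s c beg none
    if pos = -1 then true
    else if PySem.Int.mod k 4 == 3 && (pos - prev) != 1 then false
    else loopB s c (pos + 1) (k + 1) pos fuel

def valid_index_alt (ss : String) (c : String) : Bool :=
  loopB ss.toList c.toList 0 0 0 (ss.toList.length + 2)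

-- ===== PRECONDITION & SPEC =====
-- occ s c: the (overlapping) match positions of c in ss, stated declaratively (c is a prefix of s.drop j)
def occ (s c : List Char) : List Nat :=
  (List.range (s.length + 1)).filter (fun j => decide (c <+: s.drop j))

-- Pre_ excludes the inputs whose occurrence count is 3 mod 4: there A either raises IndexError reading
-- idx[i+1] one past the end of the position list, or (when an earlier group's check already fails)
-- returns False exactly as B does.
def Pre_valid_index (ss : String) (c : String) : Prop :=
  (occ ss.toList c.toList).length % 4 ≠ 3
instance (ss : String) (c : String) : Decidable (Pre_valid_index ss c) := by
  unfold Pre_valid_index; infer_instance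

def pvWitness_valid_index : String × String := ("ab", "a")

def Spec_valid_index (ss : String) (c : String) (out : Bool) : Prop := out = valid_index_alt ss c
instance (ss : String) (c : String) (out : Bool) : Decidable (Spec_valid_index ss c out) := by unfold Spec_valid_index; infer_instance

-- ===== CLAIM (what is proved, stated in full; the proofs are below) =====
def Claim_equal_valid_index : Prop := ∀ (ss : String) (c : String), Dom_valid_index ss c → Pre_valid_index ss c → Spec_valid_index ss c (valid_index ss c)

-- ===== LEMMAS AND PROOFS =====

-- abstract per-position check (what loopB computes over the stream of positions)
def chk : Int → Int → List Int → Bool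
  | _, _, [] => true
  | k, prev, pos :: rest =>
    if PySem.Int.mod k 4 == 3 && (pos - prev) != 1 then false else chk (k + 1) pos rest

-- abstract per-group check (groups of four positions; only the 3rd/4th spacing matters)
def G : List Int → Bool
  | a :: b :: c :: d :: r => if (d - c) != 1 then false else (fun _ _ _ => G r) a b c
  | _ => true

theorem findFrom_past_len (s sub : List Char) (k : Nat) (h : s.length < k) :
    PySem.Chars.findFrom s sub (k : Int) none = -1 := by
  simp only [PySem.Chars.findFrom]
  have h0 : ¬ ((k:Int) < 0) := by omega
  simp only [if_neg h0]
  rw [if_pos (by exact_mod_cast h)]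

theorem occ_sorted (s c : List Char) : (occ s c).Pairwise (· < ·) :=
  (List.pairwise_lt_range).filter _

theorem mem_occ (s c : List Char) (j : Nat) :
    j ∈ occ s c ↔ j < s.length + 1 ∧ c <+: s.drop j := by
  simp [occ, List.mem_filter, List.mem_range]

theorem filter_ge_eq_cons {l : List Nat} (hs : l.Pairwise (· < ·)) {k p : Nat}
    (hp : p ∈ l) (hkp : k ≤ p) (hmin : ∀ j ∈ l, k ≤ j → p ≤ j) :
    l.filter (fun j => k ≤ j) = p :: l.filter (fun j => p + 1 ≤ j) := by
  induction l with
  | nil => cases hp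
  | cons a t ih =>
    rcases List.mem_cons.1 hp with rfl | hpt
    · simp only [List.filter_cons, decide_eq_true_eq, if_pos hkp, if_neg (by omega : ¬ (p+1 ≤ p))]
      have hlt : ∀ j ∈ t, p < j := fun j hj => List.rel_of_pairwise_cons hs hj
      congr 1
      apply List.filter_congr
      intro j hj
      have := hlt j hj
      rw [decide_eq_decide]
      constructor <;> intro <;> omega
    · have hap : a < p := List.rel_of_pairwise_cons hs hpt
      have hak : ¬ (k ≤ a) := fun hka => absurd (hmin a (List.mem_cons_self) hka) (by omega)
      simp only [List.filter_cons, decide_eq_true_eq, if_neg hak, if_neg (by omega : ¬ (p+1 ≤ a))]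
      exact ih (List.Pairwise.of_cons hs) hpt (fun j hj hkj => hmin j (List.mem_cons_of_mem _ hj) hkj)

theorem occ_filter_hi (s c : List Char) :
    (occ s c).filter (fun j => s.length + 1 ≤ j) = [] := by
  rw [List.filter_eq_nil_iff]
  intro j hj
  have := (mem_occ s c j).1 hj
  simp only [decide_eq_true_eq]
  omega

theorem findLoopA_eq (s c : List Char) (fuel : Nat) :
    ∀ k : Nat, k ≤ s.length + 1 → s.length + 1 - k ≤ fuel →
      findLoopA s c (k : Int) fuel
        = ((occ s c).filter (fun j => k ≤ j)).map (fun j => Int.ofNat j) := by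
  induction fuel with
  | zero =>
    intro k hk hf
    have hk1 : k = s.length + 1 := by omega
    subst hk1
    rw [occ_filter_hi]
    rfl
  | succ fuel ih =>
    intro k hk hf
    by_cases hk' : k = s.length + 1
    · subst hk'
      rw [occ_filter_hi]
      have hq := findFrom_past_len s c (s.length+1) (by omega)
      push_cast at hq
      simp [findLoopA, hq]
    · have hk2 : k ≤ s.length := by omega
      by_cases hpos : PySem.Chars.findFrom s c (k : Int) none = -1
      · simp only [findLoopA, hpos, if_pos]
        have hnone : ¬ c <:+: s.drop k :=
          (PySem.Chars.findFrom_natCast_eq_neg_one_iff s c k hk2).1 hpos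
        have : (occ s c).filter (fun j => k ≤ j) = [] := by
          rw [List.filter_eq_nil_iff]
          intro j hj hdec
          have hkj : k ≤ j := by simpa using hdec
          have hj' := (mem_occ s c j).1 hj
          apply hnone
          have hpre : c <+: List.drop (j - k) (List.drop k s) := by
            rw [List.drop_drop]
            have : k + (j - k) = j := by omega
            rw [this]
            exact hj'.2
          exact (PySem.Chars.isIn_iff_infix c (s.drop k)).1
            ((PySem.Chars.exists_prefix_drop_iff_isIn c (s.drop k)).1 ⟨_, hpre⟩)
        rw [this]
        rfl
      · obtain ⟨hkp, hpre, hmin⟩ := PySem.Chars.findFrom_natCast_spec s c k hk2 hpos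
        set pos := PySem.Chars.findFrom s c (k : Int) none with hposdef
        have hple : pos ≤ s.length := by
          rw [PySem.Chars.findFrom_natCast s c k hk2] at hposdef
          have hfle := PySem.Chars.find_le_length (s.drop k) c
          rw [List.length_drop] at hfle
          by_cases hf1 : PySem.Chars.find (List.drop k s) c = -1
          · exact absurd (by rw [hposdef, if_pos hf1]) hpos
          · rw [hposdef, if_neg hf1]
            omega
        have hpos0 : 0 ≤ pos := le_trans (by omega) hkp
        set p := pos.toNat with hpdef
        have hposp : pos = (p : Int) := by omega
        have hppre : c <+: s.drop p := hpre
        have hpmem : p ∈ occ s c := (mem_occ s c p).2 ⟨by omega, hppre⟩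
        have hkple : k ≤ p := by omega
        have hminp : ∀ j ∈ occ s c, k ≤ j → p ≤ j := by
          intro j hj hkj
          by_contra hjp
          exact hmin j hkj (by omega) ((mem_occ s c j).1 hj).2
        rw [filter_ge_eq_cons (occ_sorted s c) hpmem hkple hminp]
        simp only [List.map_cons, findLoopA]
        rw [← hposdef, if_neg hpos, hposp]
        congr 1
        have : ((p : Int) + 1) = ((p + 1 : Nat) : Int) := by omega
        rw [this]
        exact ih (p + 1) (by omega) (by omega)

theorem loopB_eq_chk (s c : List Char) (fuel : Nat) :
    ∀ (beg k prev : Int), loopB s c beg k prev fuel = chk k prev (findLoopA s c beg fuel) := by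
  induction fuel with
  | zero => intro beg k prev; rfl
  | succ fuel ih =>
    intro beg k prev
    simp only [loopB, findLoopA]
    by_cases hpos : PySem.Chars.findFrom s c beg none = -1
    · simp [hpos, chk]
    · simp only [if_neg hpos, chk]
      by_cases hc : (PySem.Int.mod k 4 == 3 && (PySem.Chars.findFrom s c beg none - prev) != 1) = true
      · rw [if_pos hc, if_pos hc]
      · rw [if_neg hc, if_neg hc, ih]

theorem mod_shift (k : Int) : PySem.Int.mod (k + 4) 4 = PySem.Int.mod k 4 := by
  rw [PySem.Int.mod_eq_emod_of_pos (by norm_num), PySem.Int.mod_eq_emod_of_pos (by norm_num)]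
  omega

theorem chk_add_four (l : List Int) : ∀ k prev, chk (k + 4) prev l = chk k prev l := by
  induction l with
  | nil => intro k prev; rfl
  | cons pos rest ih =>
    intro k prev
    simp only [chk, mod_shift]
    by_cases hc : (PySem.Int.mod k 4 == 3 && (pos - prev) != 1) = true
    · rw [if_pos hc, if_pos hc]
    · rw [if_neg hc, if_neg hc]
      have : k + 4 + 1 = k + 1 + 4 := by ring
      rw [this, ih]

theorem chk_eq_G : ∀ (t : List Int) (prev : Int), chk 0 prev t = G t
  | [], _ => rfl
  | [a], _ => by simp [chk, G]
  | [a, b], _ => by simp [chk, G]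
  | [a, b, c], _ => by simp [chk, G]
  | a :: b :: c :: d :: r, prev => by
    have h4 : chk 4 d r = chk 0 d r := by
      have h := chk_add_four r 0 d
      norm_num at h
      exact h
    have ht := chk_eq_G r d
    by_cases hc : d - c = 1
    · norm_num [chk, G, hc]
      rw [h4, ht]
    · norm_num [chk, G, hc]
  termination_by t => t.length

theorem pyRange4_nil (a b : Int) (h : b ≤ a) : PySem.List.pyRange a b 4 = [] := by
  rw [PySem.List.pyRange_of_pos a b (by norm_num)]
  rw [if_neg (by omega)]
  rfl

theorem pyRange4_cons (a b : Int) (h : a < b) :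
    PySem.List.pyRange a b 4 = a :: PySem.List.pyRange (a + 4) b 4 := by
  rw [PySem.List.pyRange_of_pos a b (by norm_num), PySem.List.pyRange_of_pos (a+4) b (by norm_num)]
  rw [if_pos h]
  by_cases h4 : a + 4 < b
  · rw [if_pos h4]
    have hq : ((b - a + 4 - 1) / 4).toNat = ((b - (a+4) + 4 - 1) / 4).toNat + 1 := by
      have h1 : (b - a + 4 - 1) / 4 = (b - (a+4) + 4 - 1) / 4 + 1 := by
        omega
      rw [h1]
      omega
    rw [hq, List.range_succ_eq_map, List.map_cons, List.map_map]
    congr 1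
    · ring
    · apply List.map_congr_left
      intro k _
      simp only [Function.comp]
      push_cast
      ring
  · rw [if_neg h4]
    have hq : ((b - a + 4 - 1) / 4).toNat = 1 := by
      omega
    rw [hq]
    simp

theorem drop_len {idx t : List Int} {g : Nat} (h : idx.drop (4*g) = t) :
    idx.length - 4*g = t.length := by
  rw [← h, List.length_drop]

theorem small_case {idx t : List Int} {g : Nat} (h : idx.drop (4*g) = t)
    (hle : t.length ≤ 2) :
    forLoopA idx (PySem.List.pyRange (4*(g:Int)+2) (idx.length:Int) 4) = true := by
  have hl := drop_len h
  rw [pyRange4_nil _ _ (by omega)]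
  rfl

theorem forLoopA_eq_G (idx : List Int) (h3 : idx.length % 4 ≠ 3) :
    ∀ (t : List Int) (g : Nat), idx.drop (4*g) = t →
      forLoopA idx (PySem.List.pyRange (4*(g:Int)+2) (idx.length : Int) 4) = G t
  | [], g, h => by rw [small_case h (by simp)]; rfl
  | [a], g, h => by rw [small_case h (by simp)]; rfl
  | [a, b], g, h => by rw [small_case h (by simp)]; rfl
  | [a, b, c], g, h => by
    have hl3 : idx.length - 4*g = 3 := by simpa using drop_len h
    exact absurd (by omega : idx.length % 4 = 3) h3
  | a :: b :: c :: d :: r, g, h => by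
    have hl := drop_len h
    have hlen : 4*g + 4 ≤ idx.length := by
      simp only [List.length_cons] at hl; omega
    rw [pyRange4_cons _ _ (by exact_mod_cast (by omega : (4*g+2 : Int) < (idx.length : Int)))]
    simp only [forLoopA]
    have e1 : (4*(g:Int)+2) + 1 = ((4*g+3 : Nat) : Int) := by push_cast; ring
    have e2 : (4*(g:Int)+2) = ((4*g+2 : Nat) : Int) := by push_cast; ring
    rw [e1, e2]
    have hd := congrArg (fun l => l[3]?) h
    have hc := congrArg (fun l => l[2]?) h
    simp only [List.getElem?_drop] at hd hc
    simp only [List.getElem?_cons_succ, List.getElem?_cons_zero] at hd hc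
    rw [PySem.List.pyGet?_natCast, PySem.List.pyGet?_natCast]
    rw [hd, hc]
    simp only [G]
    by_cases hdc : (d - c != 1) = true
    · rw [if_pos hdc, if_pos hdc]
    · rw [if_neg hdc, if_neg hdc]
      have h' : idx.drop (4*(g+1)) = r := by
        have : 4*(g+1) = 4*g + 4 := by ring
        rw [this, ← List.drop_drop, h]
        rfl
      have e3 : ((4*g+2 : Nat) : Int) + 4 = 4*((g+1 : Nat) : Int) + 2 := by push_cast; ring
      rw [e3]
      exact forLoopA_eq_G idx h3 r (g+1) h'
  termination_by t => t.length

-- ===== VERDICT (by name: the statement is the Claim_ definition above) =====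
theorem valid_index_spec : Claim_equal_valid_index := by
  intro ss c _ hpre
  unfold Spec_valid_index valid_index valid_index_alt
  have hidx := findLoopA_eq ss.toList c.toList (ss.toList.length + 2) 0 (by omega) (by omega)
  have hfil : (occ ss.toList c.toList).filter (fun j => 0 ≤ j) = occ ss.toList c.toList := by
    apply List.filter_eq_self.2
    intro j _
    simp
  rw [hfil] at hidx
  push_cast at hidx
  rw [hidx, loopB_eq_chk, hidx, chk_eq_G]
  have h3 : ((occ ss.toList c.toList).map (fun j => Int.ofNat j)).length % 4 ≠ 3 := by
    rw [List.length_map]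
    exact hpre
  have := forLoopA_eq_G ((occ ss.toList c.toList).map (fun j => Int.ofNat j)) h3
    ((occ ss.toList c.toList).map (fun j => Int.ofNat j)) 0 (by simp)
  have e0 : (4*((0:Nat):Int)+2) = 2 := by norm_num
  rw [e0] at this
  exact this
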